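-- pv_equiv track=rewrite | github.com/AlgoLeadMe/AlgoLeadMe-1 | yuna83/딕셔너리/귤 고르기.py | solution
-- ===== SOURCE A (Python) =====
-- def solution(k, tangerine):
--     answer = 0
--
--     count_d = {}
--     for i in tangerine:
--         if i in count_d:
--             count_d[i] += 1
--         else:
--             count_d[i] = 1
--
--     sort_d = sorted(count_d.items(), key = lambda x: x[1], reverse = True)
--
--     for i in sort_d:
--         k -= i[1] #각 크기별 귤의 개수만큼 k에서 빼기
--         answer += 1
--         if k <= 0:
--             break
--
--     return answer
-- ===== SOURCE B (Python) =====
-- def solution(k, tangerine):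
--     # Bucket-count frequencies (bounded by len(tangerine)) instead of comparison-sorting them.
--     freq = {}
--     for t in tangerine:
--         freq[t] = freq.get(t, 0) + 1
--     bucket = {}
--     for c in freq.values():
--         bucket[c] = bucket.get(c, 0) + 1
--     answer = 0
--     for c in range(len(tangerine), 0, -1):
--         for _ in range(bucket.get(c, 0)):
--             k -= c
--             answer += 1
--             if k <= 0:
--                 return answer
--     return answer
-- ===== Notes on version B (the rewrite author's own statement) =====
-- stated objective: alternative
-- what changed: Replaces A's comparison sort of the (size,count) pairs by a bucket count of the frequencies (each frequency is between 1 and len(tangerine)), scanned from the largest frequency downward; asymptotically O(n) but not measurably faster in CPython.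
import Mathlib
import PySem

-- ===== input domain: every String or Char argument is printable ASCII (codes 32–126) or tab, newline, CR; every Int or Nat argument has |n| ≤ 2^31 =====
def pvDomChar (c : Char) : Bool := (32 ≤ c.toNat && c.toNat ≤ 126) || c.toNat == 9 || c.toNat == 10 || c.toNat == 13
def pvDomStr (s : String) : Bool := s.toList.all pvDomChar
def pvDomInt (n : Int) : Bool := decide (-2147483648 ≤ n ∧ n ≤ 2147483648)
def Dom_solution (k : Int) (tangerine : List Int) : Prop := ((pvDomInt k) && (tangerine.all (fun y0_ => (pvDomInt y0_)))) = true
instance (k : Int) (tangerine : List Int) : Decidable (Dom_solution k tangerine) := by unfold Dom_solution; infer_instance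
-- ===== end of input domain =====

-- B replaces A's comparison sort of the frequency list by a bucket count of the frequencies
-- (frequencies are bounded by len(tangerine)), scanned from the largest frequency down.

-- ===== PORT A =====
-- the 'for i in sort_d: k -= i[1]; answer += 1; if k <= 0: break' loop
def aLoop : List (Int × Int) → Int → Int → Int
  | [], _, ans => ans
  | p :: rest, k, ans =>
    let k' := k - p.2
    let ans' := ans + 1
    if k' ≤ 0 then ans' else aLoop rest k' ans'

def solution (k : Int) (tangerine : List Int) : Int :=
  let count_d : PySem.Dict Int Int :=
    tangerine.foldl
      (fun d i => if d.contains i then d.modify i 0 (· + 1) else d.insert i 1)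
      PySem.Dict.empty
  let sort_d := PySem.List.sorted count_d.items (fun x => x.2) true
  aLoop sort_d k 0

-- ===== PORT B =====
-- the inner 'for _ in range(bucket.get(c, 0)): …' loop; .inl = early 'return answer'
def bInner (c : Int) : Nat → Int → Int → Sum Int (Int × Int)
  | 0, k, ans => .inr (k, ans)
  | m + 1, k, ans =>
    let k' := k - c
    let ans' := ans + 1
    if k' ≤ 0 then .inl ans' else bInner c m k' ans'

-- the outer 'for c in range(len(tangerine), 0, -1): …' loop
def bOuter (bucket : PySem.Dict Int Int) : List Int → Int → Int → Int
  | [], _, ans => ans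
  | c :: cs, k, ans =>
    match bInner c (bucket.getD c 0).toNat k ans with
    | .inl a => a
    | .inr (k', ans') => bOuter bucket cs k' ans'

def solution_alt (k : Int) (tangerine : List Int) : Int :=
  let freq : PySem.Dict Int Int :=
    tangerine.foldl (fun d t => d.insert t (d.getD t 0 + 1)) PySem.Dict.empty
  let bucket : PySem.Dict Int Int :=
    freq.values.foldl (fun d c => d.insert c (d.getD c 0 + 1)) PySem.Dict.empty
  bOuter bucket (PySem.List.pyRange (tangerine.length : Int) 0 (-1)) k 0

-- ===== PRECONDITION & SPEC =====
def Spec_solution (k : Int) (tangerine : List Int) (out : Int) : Prop := out = solution_alt k tangerine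
instance (k : Int) (tangerine : List Int) (out : Int) : Decidable (Spec_solution k tangerine out) := by unfold Spec_solution; infer_instance

-- ===== CLAIM (what is proved, stated in full; the proofs are below) =====
def Claim_equal_solution : Prop := ∀ (k : Int) (tangerine : List Int), Dom_solution k tangerine → Spec_solution k tangerine (solution k tangerine)

-- ===== LEMMAS AND PROOFS =====

-- both loops consume a descending list of frequencies the same way: abstract greedy loop
def greedy : List Int → Int → Int → Int
  | [], _, ans => ans
  | c :: cs, k, ans => if k - c ≤ 0 then ans + 1 else greedy cs (k - c) (ans + 1)

theorem aLoop_eq_greedy (l : List (Int × Int)) (k ans : Int) :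
    aLoop l k ans = greedy (l.map (·.2)) k ans := by
  induction l generalizing k ans with
  | nil => rfl
  | cons p rest ih => simp only [aLoop, greedy, List.map]; split_ifs <;> simp [ih]

theorem bInner_greedy (c : Int) (m : Nat) (k ans : Int) (rest : List Int) :
    greedy (List.replicate m c ++ rest) k ans =
      (match bInner c m k ans with
       | .inl a => a
       | .inr (k', ans') => greedy rest k' ans') := by
  induction m generalizing k ans with
  | zero => rfl
  | succ m ih =>
    simp only [List.replicate_succ, List.cons_append, greedy, bInner]
    split_ifs <;> simp [ih]

theorem bOuter_eq_greedy (bucket : PySem.Dict Int Int) (cs : List Int) (k ans : Int) :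
    bOuter bucket cs k ans =
      greedy (cs.flatMap (fun c => List.replicate (bucket.getD c 0).toNat c)) k ans := by
  induction cs generalizing k ans with
  | nil => rfl
  | cons c cs ih =>
    simp only [bOuter, List.flatMap_cons]
    rw [bInner_greedy]
    cases bInner c (bucket.getD c 0).toNat k ans with
    | inl a => rfl
    | inr p => simp [ih]

-- A's counting loop builds exactly Counter(tangerine)
theorem countA_eq_counter (t : List Int) :
    t.foldl (fun d i => if d.contains i then d.modify i 0 (· + 1) else d.insert i 1)
      PySem.Dict.empty = PySem.Dict.counter t := by
  rw [PySem.Dict.counter_eq_foldl]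
  apply PySem.List.foldl_congr_mem
  intro d i _
  by_cases h : d.contains i
  · simp [h]
  · simp only [h, if_neg Bool.false_ne_true, PySem.Dict.modify,
      PySem.Dict.getD_of_not_contains d 0 (by simpa using h), zero_add]

-- count of a value in the bucket expansion
theorem count_flatMap_replicate (f : Int → Nat) (l : List Int) (hnd : l.Nodup) (x : Int) :
    (l.flatMap (fun c => List.replicate (f c) c)).count x =
      if x ∈ l then f x else 0 := by
  induction l with
  | nil => simp
  | cons c cs ih =>
    have hnd' := List.nodup_cons.1 hnd
    simp only [List.flatMap_cons, List.count_append, ih hnd'.2, List.mem_cons]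
    by_cases hx : x = c
    · subst hx
      simp [hnd'.1]
    · simp [List.count_replicate, hx, Ne.symm hx]

-- the bucket expansion is non-increasing when the buckets are scanned in strictly decreasing order
theorem pairwise_flatMap_replicate (f : Int → Nat) (l : List Int)
    (h : l.Pairwise (fun a b => b < a)) :
    (l.flatMap (fun c => List.replicate (f c) c)).Pairwise (fun a b => b ≤ a) := by
  induction l with
  | nil => simp
  | cons c cs ih =>
    simp only [List.flatMap_cons, List.pairwise_append]
    refine ⟨List.pairwise_replicate.2 (Or.inr le_rfl), ih h.of_cons, ?_⟩
    intro a ha b hb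
    have ha' : a = c := List.eq_of_mem_replicate ha
    obtain ⟨c', hc', hb'⟩ := List.mem_flatMap.1 hb
    have := List.eq_of_mem_replicate hb'
    subst ha' this
    exact le_of_lt (List.rel_of_pairwise_cons h hc')

-- the two frequency streams coincide
theorem vals_eq (t : List Int) :
    ((PySem.List.sorted (PySem.Dict.counter t).items (fun x => x.2) true).map (·.2)) =
      (PySem.List.pyRange (t.length : Int) 0 (-1)).flatMap
        (fun c => List.replicate ((PySem.Dict.counter (PySem.Dict.counter t).values).getD c 0).toNat c) := by
  have hV : ∀ v ∈ (PySem.Dict.counter t).values, 0 < v ∧ v ≤ (t.length : Int) := by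
    intro v hv
    rw [PySem.Dict.values_eq_map_keys _ (PySem.Dict.nodup_keys_counter t) 0] at hv
    obtain ⟨u, hu, rfl⟩ := List.mem_map.1 hv
    rw [PySem.Dict.keys_counter, PySem.Set.mem_ofList] at hu
    rw [PySem.Dict.getD_counter]
    have h1 : 0 < t.count u := List.count_pos_iff.2 hu
    have h2 : t.count u ≤ t.length := List.count_le_length
    omega
  have hrange : ∀ x : Int, x ∈ PySem.List.pyRange (t.length : Int) 0 (-1) ↔ 0 < x ∧ x ≤ (t.length : Int) :=
    fun x => PySem.List.mem_pyRange_neg_one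
  have hndr : (PySem.List.pyRange (t.length : Int) 0 (-1)).Nodup := by
    rw [PySem.List.pyRange_neg_one_eq_reverse, List.nodup_reverse]
    exact PySem.List.nodup_pyRange_one _ _
  -- both sides are permutations of (counter t).values
  have hApm : ((PySem.List.sorted (PySem.Dict.counter t).items (fun x => x.2) true).map (·.2)).Perm
      (PySem.Dict.counter t).values :=
    (PySem.List.sorted_perm (PySem.Dict.counter t).items (fun x => x.2) true).map (·.2)
  have hBpm : ((PySem.List.pyRange (t.length : Int) 0 (-1)).flatMap
      (fun c => List.replicate ((PySem.Dict.counter (PySem.Dict.counter t).values).getD c 0).toNat c)).Perm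
      (PySem.Dict.counter t).values := by
    rw [List.perm_iff_count]
    intro x
    rw [count_flatMap_replicate _ _ hndr]
    by_cases hx : x ∈ PySem.List.pyRange (t.length : Int) 0 (-1)
    · simp [hx, PySem.Dict.getD_counter]
    · have : (PySem.Dict.counter t).values.count x = 0 := by
        rw [List.count_eq_zero]
        intro hmem
        exact hx ((hrange x).2 (hV x hmem))
      simp [hx, this]
  -- both sides are non-increasing
  have hAs : ((PySem.List.sorted (PySem.Dict.counter t).items (fun x => x.2) true).map (·.2)).Pairwise
      (fun a b => b ≤ a) :=
    (PySem.List.sorted_pairwise_rev (PySem.Dict.counter t).items (fun x => x.2)).map _ (fun _ _ h => h)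
  have hBs : ((PySem.List.pyRange (t.length : Int) 0 (-1)).flatMap
      (fun c => List.replicate ((PySem.Dict.counter (PySem.Dict.counter t).values).getD c 0).toNat c)).Pairwise
      (fun a b => b ≤ a) := by
    apply pairwise_flatMap_replicate
    rw [PySem.List.pyRange_neg_one_eq_reverse, List.pairwise_reverse]
    exact PySem.List.pairwise_lt_pyRange_one _ _
  exact List.Perm.eq_of_pairwise (fun a b _ _ h1 h2 => le_antisymm h2 h1) hAs hBs
    (hApm.trans hBpm.symm)

theorem solution_eq_greedy (k : Int) (t : List Int) :
    solution k t = greedy ((PySem.List.sorted (PySem.Dict.counter t).items (fun x => x.2) true).map (·.2)) k 0 := by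
  simp only [solution, countA_eq_counter, aLoop_eq_greedy]

theorem solution_alt_eq_greedy (k : Int) (t : List Int) :
    solution_alt k t =
      greedy ((PySem.List.pyRange (t.length : Int) 0 (-1)).flatMap
        (fun c => List.replicate ((PySem.Dict.counter (PySem.Dict.counter t).values).getD c 0).toNat c)) k 0 := by
  simp only [solution_alt, PySem.Dict.foldl_insert_getD_add_one_eq_counter, bOuter_eq_greedy]

-- ===== VERDICT (by name: the statement is the Claim_ definition above) =====
theorem solution_spec : Claim_equal_solution := by
  intro k t _
  show solution k t = solution_alt k t
  rw [solution_eq_greedy, solution_alt_eq_greedy, vals_eq]
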